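-- pv_equiv track=rewrite | github.com/akshat-tamrakar/competitive-coding-challenges | other/ag_pairs.py | count_ag_pairs
-- ===== SOURCE A (Python) =====
-- def count_ag_pairs(A: str) -> int:
--     a_count = 0
--     total_pairs = 0
--
--     for char in A:
--         if char == "A":
--             a_count += 1
--         elif char == "G":
--             total_pairs += a_count
--
--     return total_pairs
-- ===== SOURCE B (Python) =====
-- def count_ag_pairs(A: str) -> int:
--     # pass 1: prefix table of cumulative 'A' counts
--     prefix = []
--     c = 0
--     for ch in A:
--         if ch == "A":
--             c += 1
--         prefix.append(c)
--     # pass 2: sum the prefix count at every 'G'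
--     total = 0
--     for i, ch in enumerate(A):
--         if ch == "G":
--             total += prefix[i]
--     return total
-- ===== Notes on version B (the rewrite author's own statement) =====
-- stated objective: alternative
-- what changed: B replaces A's single fused accumulator loop by two passes: it first materialises a prefix-sum table of cumulative 'A' counts, then sums the table entry at every 'G'.
import Mathlib
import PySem

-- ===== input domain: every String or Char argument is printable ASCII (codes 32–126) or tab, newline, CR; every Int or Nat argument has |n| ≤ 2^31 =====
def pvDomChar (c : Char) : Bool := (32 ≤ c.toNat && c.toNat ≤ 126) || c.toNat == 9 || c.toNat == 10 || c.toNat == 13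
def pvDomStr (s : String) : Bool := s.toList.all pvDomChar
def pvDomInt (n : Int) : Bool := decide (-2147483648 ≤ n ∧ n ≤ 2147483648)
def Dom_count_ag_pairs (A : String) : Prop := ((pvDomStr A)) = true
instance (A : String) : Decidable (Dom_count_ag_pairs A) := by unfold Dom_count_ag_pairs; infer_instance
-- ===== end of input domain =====

-- B replaces A's fused single-loop accumulator by two passes: an explicit prefix table of
-- cumulative 'A' counts, then a sum of the table entry at every 'G' (alternative decomposition).


-- ===== PORT A =====
-- the single loop: state (a_count, total_pairs)
def pvLoopA : List Char → Int → Int → Int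
  | [], _, t => t
  | ch :: rest, a, t =>
      if ch = 'A' then pvLoopA rest (a + 1) t
      else if ch = 'G' then pvLoopA rest a (t + a)
      else pvLoopA rest a t

def count_ag_pairs (A : String) : Int := pvLoopA A.toList 0 0

-- ===== PORT B =====
-- pass 1: prefix table of cumulative 'A' counts (c is the running count)
def pvPrefix : List Char → Int → List Int
  | [], _ => []
  | ch :: rest, c =>
      let c' := if ch = 'A' then c + 1 else c
      c' :: pvPrefix rest c'

-- pass 2: over (char, prefix-entry) pairs, add the entry at every 'G'
def pvSumG : List (Char × Int) → Int → Int
  | [], t => t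
  | (ch, p) :: rest, t => pvSumG rest (if ch = 'G' then t + p else t)

def count_ag_pairs_alt (A : String) : Int :=
  pvSumG (A.toList.zip (pvPrefix A.toList 0)) 0

-- ===== PRECONDITION & SPEC =====
def Spec_count_ag_pairs (A : String) (out : Int) : Prop := out = count_ag_pairs_alt A
instance (A : String) (out : Int) : Decidable (Spec_count_ag_pairs A out) := by unfold Spec_count_ag_pairs; infer_instance

-- ===== CLAIM (what is proved, stated in full; the proofs are below) =====
def Claim_equal_count_ag_pairs : Prop := ∀ (A : String), Dom_count_ag_pairs A → Spec_count_ag_pairs A (count_ag_pairs A)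

-- ===== LEMMAS AND PROOFS =====
theorem pvLoopA_eq_sumG (l : List Char) :
    ∀ (a t : Int), pvLoopA l a t = pvSumG (l.zip (pvPrefix l a)) t := by
  induction l with
  | nil => intro a t; simp [pvLoopA, pvPrefix, pvSumG]
  | cons ch rest ih =>
      intro a t
      by_cases hA : ch = 'A'
      · subst hA
        simp [pvLoopA, pvPrefix, pvSumG, List.zip, ih]
      · by_cases hG : ch = 'G'
        · subst hG
          simp [pvLoopA, pvPrefix, pvSumG, List.zip, ih]
        · simp [pvLoopA, pvPrefix, pvSumG, List.zip, hA, hG, ih]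

-- ===== VERDICT (by name: the statement is the Claim_ definition above) =====
theorem count_ag_pairs_spec : Claim_equal_count_ag_pairs := by
  intro A _
  unfold Spec_count_ag_pairs count_ag_pairs count_ag_pairs_alt
  exact pvLoopA_eq_sumG A.toList 0 0
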